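-- pv_equiv track=rewrite | github.com/sixtyops/manager | updater/telemetry.py | _aggregate_role_stats
-- ===== SOURCE A (Python) =====
-- from collections import Counter
-- from typing import Any, Dict, List, Optional
--
-- def _aggregate_role_stats(devices: Dict[str, Dict[str, Any]]) -> Dict[str, Dict[str, int]]:
--     """Aggregate success/failure counts by device role."""
--     role_stats: Dict[str, Counter] = {
--         "ap": Counter(),
--         "cpe": Counter(),
--         "switch": Counter(),
--     }
--
--     for device_data in devices.values():
--         role = device_data.get("role", "ap")
--         status = device_data.get("status", "unknown")
--         if role in role_stats:
--             role_stats[role][status] += 1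
--
--     return {role: dict(counts) for role, counts in role_stats.items()}
-- ===== SOURCE B (Python) =====
-- from collections import Counter
-- from typing import Any, Dict
--
--
-- def _aggregate_role_stats(devices: Dict[str, Dict[str, Any]]) -> Dict[str, Dict[str, int]]:
--     """Aggregate success/failure counts by device role (per-role filtered Counter passes)."""
--     return {
--         role: dict(Counter(
--             d.get("status", "unknown")
--             for d in devices.values()
--             if d.get("role", "ap") == role
--         ))
--         for role in ("ap", "cpe", "switch")
--     }
-- ===== Notes on version B (the rewrite author's own statement) =====
-- stated objective: idiomatic
-- what changed: Replaces the single guarded pass mutating a pre-seeded dict of Counters with a dict comprehension that builds each role's Counter in its own filtered pass over the devices.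
import Mathlib
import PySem

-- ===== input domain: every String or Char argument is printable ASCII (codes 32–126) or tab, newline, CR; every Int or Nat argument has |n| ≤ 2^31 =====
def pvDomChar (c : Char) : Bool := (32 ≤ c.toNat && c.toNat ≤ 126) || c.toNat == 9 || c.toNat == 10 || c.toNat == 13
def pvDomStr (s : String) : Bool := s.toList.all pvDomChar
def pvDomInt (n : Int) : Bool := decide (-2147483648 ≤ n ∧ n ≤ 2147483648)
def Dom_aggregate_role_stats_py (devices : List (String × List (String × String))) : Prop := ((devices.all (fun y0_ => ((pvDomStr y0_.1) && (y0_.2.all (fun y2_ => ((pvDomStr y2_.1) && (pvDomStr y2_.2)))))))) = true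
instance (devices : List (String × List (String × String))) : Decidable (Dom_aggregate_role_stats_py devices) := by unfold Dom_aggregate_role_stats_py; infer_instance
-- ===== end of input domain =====

-- B replaces A's single guarded pass over a pre-seeded dict of Counters by one filtered
-- Counter pass per role (a dict comprehension); same result, idiomatic, not claimed faster.

-- ===== PORT A =====
def aggregate_role_stats_py (devices : List (String × List (String × String))) : List (String × List (String × Int)) :=
  let role_stats : PySem.Dict String (PySem.Dict String Int) :=
    PySem.Dict.ofList [("ap", PySem.Dict.empty), ("cpe", PySem.Dict.empty), ("switch", PySem.Dict.empty)]
  let role_stats := (PySem.Dict.ofList devices).values.foldl (fun rs device_data =>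
      let dd := PySem.Dict.ofList device_data
      let role := dd.getD "role" "ap"
      let status := dd.getD "status" "unknown"
      if rs.contains role then
        rs.modify role PySem.Dict.empty (fun cnt => cnt.modify status 0 (· + 1))
      else rs)
    role_stats
  role_stats.items.map (fun p => (p.1, p.2.items))

-- ===== PORT B =====
-- Counter(d.get("status","unknown") for d in devices.values() if d.get("role","ap") == role)
def pvRoleCounter (devices : List (String × List (String × String))) (role : String) : PySem.Dict String Int :=
  PySem.Dict.counter (((PySem.Dict.ofList devices).values.filter
      (fun d => (PySem.Dict.ofList d).getD "role" "ap" == role)).map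
      (fun d => (PySem.Dict.ofList d).getD "status" "unknown"))

def aggregate_role_stats_py_alt (devices : List (String × List (String × String))) : List (String × List (String × Int)) :=
  ["ap", "cpe", "switch"].map (fun role => (role, (pvRoleCounter devices role).items))

-- ===== PRECONDITION & SPEC =====
def Spec_aggregate_role_stats_py (devices : List (String × List (String × String))) (out : List (String × List (String × Int))) : Prop := out = aggregate_role_stats_py_alt devices
instance (devices : List (String × List (String × String))) (out : List (String × List (String × Int))) : Decidable (Spec_aggregate_role_stats_py devices out) := by unfold Spec_aggregate_role_stats_py; infer_instance

-- ===== CLAIM (what is proved, stated in full; the proofs are below) =====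
def Claim_equal_aggregate_role_stats_py : Prop := ∀ (devices : List (String × List (String × String))), Dom_aggregate_role_stats_py devices → Spec_aggregate_role_stats_py devices (aggregate_role_stats_py devices)

-- ===== LEMMAS AND PROOFS =====

-- statuses of the devices in l whose role is r, in order
def pvStat (l : List (List (String × String))) (r : String) : List String :=
  (l.filter (fun d => (PySem.Dict.ofList d).getD "role" "ap" == r)).map
    (fun d => (PySem.Dict.ofList d).getD "status" "unknown")

def pvCFold (a : PySem.Dict String Int) (s : List String) : PySem.Dict String Int :=
  s.foldl (fun c x => c.modify x 0 (· + 1)) a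

lemma pv_step (a b c : PySem.Dict String Int) (role status : String) :
    (if (PySem.Dict.mk [("ap", a), ("cpe", b), ("switch", c)]).contains role then
       (PySem.Dict.mk [("ap", a), ("cpe", b), ("switch", c)]).modify role PySem.Dict.empty
         (fun cnt => cnt.modify status 0 (· + 1))
     else PySem.Dict.mk [("ap", a), ("cpe", b), ("switch", c)]) =
    PySem.Dict.mk [("ap", if role = "ap" then a.modify status 0 (· + 1) else a),
                   ("cpe", if role = "cpe" then b.modify status 0 (· + 1) else b),
                   ("switch", if role = "switch" then c.modify status 0 (· + 1) else c)] := by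
  by_cases hap : role = "ap"
  · subst hap
    simp [PySem.Dict.contains, PySem.Dict.modify, PySem.Dict.insert, PySem.Dict.getD, PySem.Dict.get?, List.find?]
  · by_cases hcpe : role = "cpe"
    · subst hcpe
      simp [PySem.Dict.contains, PySem.Dict.modify, PySem.Dict.insert, PySem.Dict.getD, PySem.Dict.get?, List.find?]
    · by_cases hsw : role = "switch"
      · subst hsw
        simp [PySem.Dict.contains, PySem.Dict.modify, PySem.Dict.insert, PySem.Dict.getD, PySem.Dict.get?, List.find?]
      · simp [PySem.Dict.contains, hap, hcpe, hsw, Ne.symm hap, Ne.symm hcpe, Ne.symm hsw]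

lemma pv_loop (l : List (List (String × String))) (a b c : PySem.Dict String Int) :
    l.foldl (fun rs device_data =>
      if rs.contains ((PySem.Dict.ofList device_data).getD "role" "ap") then
        rs.modify ((PySem.Dict.ofList device_data).getD "role" "ap") PySem.Dict.empty
          (fun cnt => cnt.modify ((PySem.Dict.ofList device_data).getD "status" "unknown") 0 (· + 1))
      else rs)
      (PySem.Dict.mk [("ap", a), ("cpe", b), ("switch", c)]) =
    PySem.Dict.mk [("ap", pvCFold a (pvStat l "ap")), ("cpe", pvCFold b (pvStat l "cpe")),
                   ("switch", pvCFold c (pvStat l "switch"))] := by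
  induction l generalizing a b c with
  | nil => simp [pvStat, pvCFold]
  | cons d t ih =>
    simp only [List.foldl_cons]
    rw [pv_step]
    rw [ih]
    by_cases hap : (PySem.Dict.ofList d).getD "role" "ap" = "ap" <;>
      by_cases hcpe : (PySem.Dict.ofList d).getD "role" "ap" = "cpe" <;>
      by_cases hsw : (PySem.Dict.ofList d).getD "role" "ap" = "switch" <;>
      simp_all [pvStat, pvCFold]

-- ===== VERDICT (by name: the statement is the Claim_ definition above) =====
theorem aggregate_role_stats_py_spec : Claim_equal_aggregate_role_stats_py := by
  intro devices _
  show aggregate_role_stats_py devices = aggregate_role_stats_py_alt devices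
  simp only [aggregate_role_stats_py, aggregate_role_stats_py_alt, pvRoleCounter]
  rw [show (PySem.Dict.ofList [("ap", (PySem.Dict.empty : PySem.Dict String Int)), ("cpe", PySem.Dict.empty), ("switch", PySem.Dict.empty)]) = PySem.Dict.mk [("ap", PySem.Dict.empty), ("cpe", PySem.Dict.empty), ("switch", PySem.Dict.empty)] from rfl]
  rw [pv_loop]
  simp [pvCFold, pvStat, PySem.Dict.counter_eq_foldl]
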